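-- pv_equiv track=rewrite | github.com/eliottcassidy2000/math | 04-computation/ip_hierarchy.py | compute_ip_at_x
-- ===== SOURCE A (Python) =====
-- def compute_ip_at_x(groups, x):
--     """Compute I(Ω, x) using vertex-set decomposition."""
--     vs_list = list(groups.items())
--     n_vs = len(vs_list)
--
--     # Build adjacency
--     adj = [[False]*n_vs for _ in range(n_vs)]
--     for i in range(n_vs):
--         for j in range(i+1, n_vs):
--             if vs_list[i][0] & vs_list[j][0]:
--                 adj[i][j] = adj[j][i] = True
--
--     # I(Ω, x) = sum over independent sets of vertex sets,
--     # for each: product of d(S_i) * x^k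
--     total = 0
--     for mask in range(2**n_vs):
--         verts_in = [i for i in range(n_vs) if mask & (1 << i)]
--         independent = True
--         for i in range(len(verts_in)):
--             for j in range(i+1, len(verts_in)):
--                 if adj[verts_in[i]][verts_in[j]]:
--                     independent = False
--                     break
--             if not independent:
--                 break
--         if independent:
--             k = len(verts_in)
--             mult = 1
--             for idx in verts_in:
--                 mult *= vs_list[idx][1]
--             total += mult * (x**k)
--
--     return total
-- ===== SOURCE B (Python) =====
-- def compute_ip_at_x(groups, x):
--     """Compute I(Omega, x) by deletion-contraction over the vertex sets:
--     I(G) = I(G - v) + x*w(v)*I(G - N[v]), visiting only independent sets."""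
--     def rec(items):
--         if not items:
--             return 1
--         (k, w), rest = items[0], items[1:]
--         compatible = [p for p in rest if p[0] & k == 0]
--         return rec(rest) + x * w * rec(compatible)
--     return rec(list(groups.items()))
-- ===== Notes on version B (the rewrite author's own statement) =====
-- stated objective: faster
-- what changed: Replaced A's enumeration of all 2^n vertex subsets with a pairwise independence check per subset by a deletion-contraction recursion I(G)=I(G-v)+x*w(v)*I(G-N[v]) that only ever visits independent sets.
import Mathlib
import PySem

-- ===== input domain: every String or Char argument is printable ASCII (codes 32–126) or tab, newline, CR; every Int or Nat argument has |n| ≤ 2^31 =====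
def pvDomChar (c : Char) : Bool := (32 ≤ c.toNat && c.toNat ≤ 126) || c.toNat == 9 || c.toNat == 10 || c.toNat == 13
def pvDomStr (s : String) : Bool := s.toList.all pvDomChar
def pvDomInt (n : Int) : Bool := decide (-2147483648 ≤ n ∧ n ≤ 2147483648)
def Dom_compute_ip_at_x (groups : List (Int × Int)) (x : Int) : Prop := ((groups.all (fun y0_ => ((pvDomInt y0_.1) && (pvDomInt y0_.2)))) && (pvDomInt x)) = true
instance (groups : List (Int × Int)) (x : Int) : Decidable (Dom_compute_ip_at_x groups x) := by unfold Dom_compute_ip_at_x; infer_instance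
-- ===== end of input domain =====

-- B replaces A's scan of all 2^n subsets (with a quadratic independence check each) by the
-- deletion-contraction recursion I(G) = I(G-v) + x*w(v)*I(G-N[v]), which only visits independent sets.

-- ===== PORT A =====
-- The adjacency matrix exactly as A's double loop leaves it: entry (i,j) is True iff i ≠ j and
-- the two keys share a bit (the loop sets each i<j pair and its mirror; the diagonal stays False).
def pvAdj (l : List (Int × Int)) : List (List Bool) :=
  (List.range l.length).map (fun (i : Nat) => (List.range l.length).map (fun (j : Nat) =>
    decide (i ≠ j) &&
      decide (PySem.Int.band (PySem.List.pyGetD l (i : Int) (0, 0)).1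
                             (PySem.List.pyGetD l (j : Int) (0, 0)).1 ≠ 0)))

-- A's break-out double loop over verts_in: independent becomes False at the first adjacent pair
-- (outer index v, inner index u running over the later entries; && short-circuits like the breaks).
def pvIndep (adj : List (List Bool)) : List Nat → Bool
  | [] => true
  | v :: rest =>
      (rest.all fun u =>
        !(PySem.List.pyGetD (PySem.List.pyGetD adj (v : Int) []) (u : Int) false)) &&
      pvIndep adj rest

-- [i for i in range(n_vs) if mask & (1 << i)]  (mask and 1 << i are nonnegative, so Nat's &&& is exact)
def pvVerts (n : Nat) (mask : Nat) : List Nat :=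
  (List.range n).filter (fun i => mask &&& (1 <<< i) != 0)

def compute_ip_at_x (groups : List (Int × Int)) (x : Int) : Int :=
  let vs_list := (PySem.Dict.ofList groups).items   -- list(groups.items())
  let n_vs := vs_list.length
  let adj := pvAdj vs_list
  (List.range (2 ^ n_vs)).foldl (fun total mask =>
    let verts_in := pvVerts n_vs mask
    if pvIndep adj verts_in then
      total + (verts_in.foldl
                 (fun (mult : Int) (idx : Nat) => mult * (PySem.List.pyGetD vs_list (idx : Int) (0, 0)).2) 1)
              * x ^ verts_in.length
    else total) 0

-- ===== PORT B =====
def pvIpRec (x : Int) : List (Int × Int) → Int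
  | [] => 1
  | (k, w) :: rest =>
      pvIpRec x rest + x * w * pvIpRec x (rest.filter fun p => PySem.Int.band p.1 k == 0)
termination_by l => l.length
decreasing_by
  · simp
  · have h := List.length_filter_le (fun x : {y // y ∈ rest} => PySem.Int.band x.val.1 k == 0) rest.attach
    simp at h ⊢
    omega

def compute_ip_at_x_alt (groups : List (Int × Int)) (x : Int) : Int :=
  pvIpRec x (PySem.Dict.ofList groups).items

-- ===== PRECONDITION & SPEC =====
def Spec_compute_ip_at_x (groups : List (Int × Int)) (x : Int) (out : Int) : Prop := out = compute_ip_at_x_alt groups x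
instance (groups : List (Int × Int)) (x : Int) (out : Int) : Decidable (Spec_compute_ip_at_x groups x out) := by unfold Spec_compute_ip_at_x; infer_instance

-- ===== CLAIM (what is proved, stated in full; the proofs are below) =====
def Claim_equal_compute_ip_at_x : Prop := ∀ (groups : List (Int × Int)) (x : Int), Dom_compute_ip_at_x groups x → Spec_compute_ip_at_x groups x (compute_ip_at_x groups x)

-- ===== LEMMAS AND PROOFS =====

-- Two vertex sets are compatible (non-adjacent) iff their keys share no bit.
abbrev pvCompat (p q : Int × Int) : Prop := PySem.Int.band p.1 q.1 = 0

-- Contribution of one selected sublist S: d(S) * x^|S| if S is independent, else 0.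
def pvTerm (x : Int) (S : List (Int × Int)) : Int :=
  if S.Pairwise pvCompat then (S.map (·.2)).prod * x ^ S.length else 0

-- The weighted independence polynomial as a sum over all (position-)sublists.
def pvSubsum (x : Int) (l : List (Int × Int)) : Int := (l.sublists.map (pvTerm x)).sum

lemma pvTerm_cons (x : Int) (a : Int × Int) (s : List (Int × Int)) :
    pvTerm x (a :: s) =
      if s.all (fun p => PySem.Int.band p.1 a.1 == 0) then x * a.2 * pvTerm x s else 0 := by
  unfold pvTerm
  simp only [List.pairwise_cons]
  have hiff : (∀ b ∈ s, pvCompat a b) ↔ (s.all (fun p => PySem.Int.band p.1 a.1 == 0) = true) := by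
    simp only [List.all_eq_true, beq_iff_eq]
    constructor
    · intro h b hb; have := h b hb; unfold pvCompat at this; rwa [PySem.Int.band_comm] at this
    · intro h b hb; have := h b hb; show PySem.Int.band a.1 b.1 = 0; rwa [PySem.Int.band_comm]
  by_cases hall : s.all (fun p => PySem.Int.band p.1 a.1 == 0) = true
  · rw [if_pos hall]
    by_cases hp : s.Pairwise pvCompat
    · rw [if_pos ⟨hiff.2 hall, hp⟩, if_pos hp]
      simp only [List.map_cons, List.prod_cons, List.length_cons, pow_succ]
      ring
    · rw [if_neg (fun h => hp h.2), if_neg hp]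
      ring
  · rw [if_neg (fun h => hall (hiff.1 h.1)), if_neg (by exact hall)]

lemma pv_sum_flatMap_pair {α : Type} (l : List α) (f g : α → Int) :
    ((l.flatMap fun s => [f s, g s]) : List Int).sum = (l.map fun s => f s + g s).sum := by
  induction l with
  | nil => rfl
  | cons a l ih => simp [List.flatMap_cons, ih]; ring

lemma pv_sum_sublists_filter {α : Type} (P : α → Bool) (l : List α) (g : List α → Int) :
    (l.sublists.map fun s => if s.all P then g s else 0).sum
      = ((l.filter P).sublists.map g).sum := by
  induction l generalizing g with
  | nil => simp
  | cons a l ih =>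
    rw [List.sublists_cons]
    show ((l.sublists.flatMap fun s => [s, a :: s]).map fun t => if t.all P then g t else 0).sum = _
    rw [List.map_flatMap]
    have hmap : ∀ s : List α, ([s, a :: s].map fun t => if t.all P then g t else 0)
        = [if s.all P then g s else 0, if (a :: s).all P then g (a :: s) else 0] := by
      intro s; rfl
    simp only [hmap]
    rw [pv_sum_flatMap_pair]
    by_cases ha : P a
    · have hfc : (a :: l).filter P = a :: l.filter P := by simp [ha]
      rw [hfc, List.sublists_cons]
      show _ = (((l.filter P).sublists.flatMap fun s => [s, a :: s]).map g).sum
      rw [List.map_flatMap]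
      have hmap2 : ∀ s : List α, ([s, a :: s].map g) = [g s, g (a :: s)] := by intro s; rfl
      simp only [hmap2]
      rw [pv_sum_flatMap_pair]
      have hall : ∀ s : List α, (a :: s).all P = s.all P := by intro s; simp [ha]
      simp only [hall]
      have hsplit : (l.sublists.map fun s =>
          (if s.all P then g s else 0) + (if s.all P then g (a :: s) else 0)).sum
          = (l.sublists.map fun s => if s.all P then g s else 0).sum
            + (l.sublists.map fun s => if s.all P then g (a :: s) else 0).sum := by
        exact List.sum_map_add
      rw [hsplit, ih g, ih (fun s => g (a :: s))]
      exact List.sum_map_add.symm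
    · have hfc : (a :: l).filter P = l.filter P := by simp [ha]
      have hall : ∀ s : List α, (a :: s).all P = false := by intro s; simp [ha]
      simp only [hall, hfc, Bool.false_eq_true, if_false, add_zero]
      exact ih g

lemma pvIpRec_eq_subsum (x : Int) (l : List (Int × Int)) : pvIpRec x l = pvSubsum x l := by
  fun_induction pvIpRec with
  | case1 => simp [pvSubsum, pvTerm]
  | case2 k w rest ih1 ih2 =>
    rw [List.unattach_filter (g := fun p => PySem.Int.band p.1 k == 0) (hf := fun x h => rfl),
        List.unattach_attach] at ih2
    rw [ih1, ih2]
    unfold pvSubsum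
    rw [List.sublists_cons]
    show _ = ((rest.sublists.flatMap fun s => [s, (k, w) :: s]).map (pvTerm x)).sum
    rw [List.map_flatMap]
    have hmap : ∀ s : List (Int × Int),
        ([s, (k, w) :: s].map (pvTerm x)) = [pvTerm x s, pvTerm x ((k, w) :: s)] := by
      intro s; rfl
    simp only [hmap]
    rw [pv_sum_flatMap_pair, List.sum_map_add]
    have hterm : ∀ s : List (Int × Int),
        pvTerm x ((k, w) :: s)
          = x * w * (if s.all (fun p => PySem.Int.band p.1 k == 0) then pvTerm x s else 0) := by
      intro s
      rw [pvTerm_cons]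
      split <;> simp
    simp only [hterm]
    rw [List.sum_map_mul_left, pv_sum_sublists_filter]

-- ---- A side ----

def pvSelect (l : List (Int × Int)) (mask : Nat) : List (Int × Int) :=
  (pvVerts l.length mask).map (fun i => l.getD i (0, 0))

lemma pv_bit (mask i : Nat) : (mask &&& (1 <<< i) != 0) = mask.testBit i := by
  rw [Nat.shiftLeft_eq, one_mul, Nat.and_two_pow]
  cases mask.testBit i <;> simp

lemma pvVerts_succ (n mask : Nat) :
    pvVerts (n + 1) mask
      = (if mask.testBit 0 then [0] else []) ++ (pvVerts n (mask / 2)).map Nat.succ := by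
  unfold pvVerts
  rw [List.range_succ_eq_map, List.filter_cons, List.filter_map]
  have hp : ((fun i => mask &&& (1 <<< i) != 0) ∘ Nat.succ)
      = fun i => (mask / 2) &&& (1 <<< i) != 0 := by
    funext i
    simp [Function.comp, pv_bit, Nat.succ_eq_add_one, Nat.testBit_add_one]
  rw [hp, pv_bit]
  cases mask.testBit 0 <;> simp

lemma pvSelect_even (a : Int × Int) (l : List (Int × Int)) (m : Nat) :
    pvSelect (a :: l) (2 * m) = pvSelect l m := by
  unfold pvSelect
  have h0 : (2 * m).testBit 0 = false := by rw [Nat.testBit_zero]; simp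
  have h2 : 2 * m / 2 = m := by omega
  rw [List.length_cons, pvVerts_succ, h0, h2]
  simp [List.map_map, Function.comp, Nat.succ_eq_add_one]

lemma pvSelect_odd (a : Int × Int) (l : List (Int × Int)) (m : Nat) :
    pvSelect (a :: l) (2 * m + 1) = a :: pvSelect l m := by
  unfold pvSelect
  have h0 : (2 * m + 1).testBit 0 = true := by rw [Nat.testBit_zero]; simp
  have h2 : (2 * m + 1) / 2 = m := by omega
  rw [List.length_cons, pvVerts_succ, h0, h2]
  simp [List.map_map, Function.comp, Nat.succ_eq_add_one]

lemma pv_range_two_mul (k : Nat) :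
    List.range (2 * k) = (List.range k).flatMap (fun m => [2 * m, 2 * m + 1]) := by
  induction k with
  | zero => rfl
  | succ k ih =>
    have h : 2 * (k + 1) = (2 * k + 1) + 1 := by ring
    rw [h, List.range_succ, List.range_succ, ih, List.range_succ, List.flatMap_append]
    simp [List.flatMap_cons]

lemma pv_map_select (l : List (Int × Int)) :
    (List.range (2 ^ l.length)).map (pvSelect l) = l.sublists := by
  induction l with
  | nil => rfl
  | cons a l ih =>
    have h : (a :: l).length = l.length + 1 := rfl
    rw [h, pow_succ, mul_comm, pv_range_two_mul, List.map_flatMap]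
    have hm : ∀ m : Nat, ([2 * m, 2 * m + 1].map (pvSelect (a :: l)))
        = [pvSelect l m, a :: pvSelect l m] := by
      intro m; simp [pvSelect_even, pvSelect_odd]
    simp only [hm]
    rw [List.sublists_cons, ← ih]
    show _ = ((List.range (2 ^ l.length)).map (pvSelect l)).flatMap fun s => [s, a :: s]
    exact (List.flatMap_map (pvSelect l) (fun s => [s, a :: s]) _).symm

lemma pvIndep_eq (l : List (Int × Int)) (vs : List Nat)
    (hs : vs.Pairwise (· < ·)) (hn : ∀ v ∈ vs, v < l.length) :
    pvIndep (pvAdj l) vs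
      = decide ((vs.map (fun i => l.getD i (0, 0))).Pairwise pvCompat) := by
  induction vs with
  | nil => simp [pvIndep]
  | cons v rest ih =>
    have hv : v < l.length := hn v (by simp)
    have hlt : ∀ u ∈ rest, v < u := (List.pairwise_cons.1 hs).1
    have hlook : ∀ u ∈ rest,
        (PySem.List.pyGetD (PySem.List.pyGetD (pvAdj l) (v : Int) []) (u : Int) false)
          = !(decide (pvCompat (l.getD v (0, 0)) (l.getD u (0, 0)))) := by
      intro u hu
      have hu' : u < l.length := hn u (by simp [hu])
      have hne : v ≠ u := Nat.ne_of_lt (hlt u hu)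
      unfold pvAdj
      rw [PySem.List.pyGetD_natCast, PySem.List.pyGetD_natCast,
          PySem.List.getD_map_range _ _ _ _ hv, PySem.List.getD_map_range _ _ _ _ hu']
      simp [hne, pvCompat, PySem.List.pyGetD_natCast]
    show ((rest.all fun u =>
        !(PySem.List.pyGetD (PySem.List.pyGetD (pvAdj l) (v : Int) []) (u : Int) false))
        && pvIndep (pvAdj l) rest) = _
    rw [ih (List.pairwise_cons.1 hs).2 (fun u hu => hn u (List.mem_cons_of_mem _ hu))]
    rw [Bool.eq_iff_iff]
    simp only [Bool.and_eq_true, List.all_eq_true, decide_eq_true_eq,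
      List.map_cons, List.pairwise_cons, List.forall_mem_map]
    constructor
    · rintro ⟨h1, h2⟩
      refine ⟨fun u hu => ?_, h2⟩
      have := h1 u hu
      rw [hlook u hu] at this
      simpa using this
    · rintro ⟨h1, h2⟩
      refine ⟨fun u hu => ?_, h2⟩
      rw [hlook u hu]
      simpa using h1 u hu

lemma pvA_eq_subsum (l : List (Int × Int)) (x : Int) :
    (List.range (2 ^ l.length)).foldl (fun total mask =>
      let verts_in := pvVerts l.length mask
      if pvIndep (pvAdj l) verts_in then
        total + (verts_in.foldl
                   (fun (mult : Int) (idx : Nat) => mult * (PySem.List.pyGetD l (idx : Int) (0, 0)).2) 1)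
                * x ^ verts_in.length
      else total) 0 = pvSubsum x l := by
  have hfun : (fun (total : Int) (mask : Nat) =>
        let verts_in := pvVerts l.length mask
        if pvIndep (pvAdj l) verts_in then
          total + (verts_in.foldl
                     (fun (mult : Int) (idx : Nat) => mult * (PySem.List.pyGetD l (idx : Int) (0, 0)).2) 1)
                  * x ^ verts_in.length
        else total)
      = fun total mask => total +
          (if pvIndep (pvAdj l) (pvVerts l.length mask) then
            ((pvVerts l.length mask).foldl
               (fun (mult : Int) (idx : Nat) => mult * (PySem.List.pyGetD l (idx : Int) (0, 0)).2) 1)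
              * x ^ (pvVerts l.length mask).length
          else 0) := by
    funext t m
    dsimp only
    split <;> simp
  rw [hfun, PySem.List.foldl_add, zero_add]
  have hterm : ∀ mask : Nat,
      (if pvIndep (pvAdj l) (pvVerts l.length mask) then
        ((pvVerts l.length mask).foldl
           (fun (mult : Int) (idx : Nat) => mult * (PySem.List.pyGetD l (idx : Int) (0, 0)).2) 1)
          * x ^ (pvVerts l.length mask).length
      else 0) = pvTerm x (pvSelect l mask) := by
    intro mask
    have hs : (pvVerts l.length mask).Pairwise (· < ·) :=
      List.Pairwise.sublist (List.filter_sublist ..) List.pairwise_lt_range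
    have hn : ∀ v ∈ pvVerts l.length mask, v < l.length := by
      intro v hv
      exact List.mem_range.1 (List.mem_of_mem_filter hv)
    rw [pvIndep_eq l _ hs hn]
    have hprod : (pvVerts l.length mask).foldl
        (fun (mult : Int) (idx : Nat) => mult * (PySem.List.pyGetD l (idx : Int) (0, 0)).2) 1
        = (((pvVerts l.length mask).map (fun i => l.getD i (0, 0))).map (fun p => p.2)).prod := by
      rw [List.map_map, List.prod_eq_foldl, List.foldl_map]
      simp only [PySem.List.pyGetD_natCast, Function.comp]
    unfold pvTerm pvSelect
    rw [hprod, List.length_map]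
    split <;> simp_all
  simp only [hterm]
  rw [show ((List.range (2 ^ l.length)).map fun mask => pvTerm x (pvSelect l mask))
        = ((List.range (2 ^ l.length)).map (pvSelect l)).map (pvTerm x) from
      (List.map_map (f := pvSelect l) (g := pvTerm x) (l := List.range (2 ^ l.length))).symm,
    pv_map_select]
  rfl

-- ===== VERDICT (by name: the statement is the Claim_ definition above) =====
theorem compute_ip_at_x_spec : Claim_equal_compute_ip_at_x := by
  intro groups x _
  show _ = _
  unfold compute_ip_at_x compute_ip_at_x_alt
  rw [pvIpRec_eq_subsum]
  exact pvA_eq_subsum _ x
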